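-- pv_equiv track=rewrite | github.com/zantyru/wrk-Python121-exercises-02 | 2022_04_04/set0001_z01.py | compute_loops_in_digit_glyphs
-- ===== SOURCE A (Python) =====
-- def compute_loops_in_digit_glyphs(n):
--     s = str(n)
--     result = 0
--     for digit in s:
--         if digit == "0":
--             result += 1
--         elif digit == "6":
--             result += 1
--         elif digit == "8":
--             result += 2
--         elif digit == "9":
--             result += 1
--     return result
-- ===== SOURCE B (Python) =====
-- def compute_loops_in_digit_glyphs(n):
--     weights = (1, 0, 0, 0, 0, 0, 1, 0, 2, 1)
--     m = -n if n < 0 else n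
--     total = weights[m % 10]
--     m //= 10
--     while m:
--         total += weights[m % 10]
--         m //= 10
--     return total
-- ===== Notes on version B (the rewrite author's own statement) =====
-- stated objective: alternative
-- what changed: Replaces the string conversion and per-character branching scan by pure integer arithmetic: repeated divmod-by-10 digit extraction on abs(n) with a per-digit weight lookup table, no string is ever built.
import Mathlib
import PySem

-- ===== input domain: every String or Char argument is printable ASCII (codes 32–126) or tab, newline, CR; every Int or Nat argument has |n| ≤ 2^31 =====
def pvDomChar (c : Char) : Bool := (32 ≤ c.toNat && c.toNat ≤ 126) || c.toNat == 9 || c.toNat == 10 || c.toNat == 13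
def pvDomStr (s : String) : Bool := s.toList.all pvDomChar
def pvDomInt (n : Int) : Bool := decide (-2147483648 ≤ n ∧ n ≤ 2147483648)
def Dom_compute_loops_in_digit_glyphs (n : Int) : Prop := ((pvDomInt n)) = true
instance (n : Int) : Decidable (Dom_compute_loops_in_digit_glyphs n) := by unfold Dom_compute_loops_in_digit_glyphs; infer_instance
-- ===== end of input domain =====

-- B replaces A's string conversion + per-character scan by arithmetic digit extraction
-- (repeated divmod-by-10 on abs(n)) with a per-digit weight table; return value only.
-- ===== PORT A =====
def compute_loops_in_digit_glyphs (n : Int) : Int :=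
  let s := PySem.Int.toStr n
  let result : Int := 0
  s.toList.foldl (fun result digit =>
    if digit == '0' then result + 1
    else if digit == '6' then result + 1
    else if digit == '8' then result + 2
    else if digit == '9' then result + 1
    else result) result

-- ===== PORT B =====
-- weights = (1, 0, 0, 0, 0, 0, 1, 0, 2, 1)
def pvWeightsB : List Int := [1, 0, 0, 0, 0, 0, 1, 0, 2, 1]

-- the 'while m:' loop of Source B: extract digits by % 10 and // 10
def pvLoopB (m : Nat) (total : Int) : Int :=
  if m = 0 then total
  else pvLoopB (m / 10) (total + pvWeightsB.getD (m % 10) 0)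
termination_by m
decreasing_by exact Nat.div_lt_self (Nat.pos_of_ne_zero (by assumption)) (by norm_num)

def compute_loops_in_digit_glyphs_alt (n : Int) : Int :=
  let m : Nat := n.natAbs          -- m = -n if n < 0 else n
  pvLoopB (m / 10) (pvWeightsB.getD (m % 10) 0)

-- ===== PRECONDITION & SPEC =====
def Spec_compute_loops_in_digit_glyphs (n : Int) (out : Int) : Prop := out = compute_loops_in_digit_glyphs_alt n
instance (n : Int) (out : Int) : Decidable (Spec_compute_loops_in_digit_glyphs n out) := by unfold Spec_compute_loops_in_digit_glyphs; infer_instance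

-- ===== CLAIM (what is proved, stated in full; the proofs are below) =====
def Claim_equal_compute_loops_in_digit_glyphs : Prop := ∀ (n : Int), Dom_compute_loops_in_digit_glyphs n → Spec_compute_loops_in_digit_glyphs n (compute_loops_in_digit_glyphs n)

-- ===== LEMMAS AND PROOFS =====

-- per-character weight, and the weighted sum of a number's decimal digits
def pvWc (c : Char) : Int :=
  if c = '0' then 1 else if c = '6' then 1 else if c = '8' then 2 else if c = '9' then 1 else 0

def pvWS (m : Nat) : Int :=
  pvWeightsB.getD (m % 10) 0 + (if m / 10 = 0 then 0 else pvWS (m / 10))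
termination_by m
decreasing_by exact Nat.div_lt_self (Nat.pos_of_ne_zero (by omega)) (by norm_num)

-- A's fold is the start value plus the sum of per-character weights
lemma pvFoldA_eq (l : List Char) (a : Int) :
    l.foldl (fun result digit =>
      if digit == '0' then result + 1
      else if digit == '6' then result + 1
      else if digit == '8' then result + 2
      else if digit == '9' then result + 1
      else result) a = a + (l.map pvWc).sum := by
  induction l generalizing a with
  | nil => simp
  | cons h t ih =>
    simp only [List.foldl_cons, ih, List.map_cons, List.sum_cons, pvWc]
    split_ifs <;> simp_all <;> ring

lemma pvWc_digitChar (r : Nat) (hr : r < 10) :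
    pvWc (Nat.digitChar r) = pvWeightsB.getD r 0 := by
  interval_cases r <;> decide

lemma pvSum_toDigitsCore (fuel : Nat) : ∀ (m : Nat) (ds : List Char), m < fuel →
    ((Nat.toDigitsCore 10 fuel m ds).map pvWc).sum = pvWS m + (ds.map pvWc).sum := by
  induction fuel with
  | zero => intro m ds h; omega
  | succ f ih =>
    intro m ds h
    rw [Nat.toDigitsCore]
    by_cases h0 : m / 10 = 0
    · rw [pvWS]
      simp [h0, pvWc_digitChar (m % 10) (Nat.mod_lt _ (by norm_num))]
    · have hm : m / 10 < f := by
        have h1 : m / 10 < m := Nat.div_lt_self (by omega) (by norm_num)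
        omega
      simp only [h0, if_false]
      rw [ih (m / 10) _ hm]
      conv_rhs => rw [pvWS]
      simp [h0, pvWc_digitChar (m % 10) (Nat.mod_lt _ (by norm_num))]
      ring

lemma pvLoopB_eq (m : Nat) : ∀ (acc : Int),
    pvLoopB m acc = acc + (if m = 0 then 0 else pvWS m) := by
  induction m using Nat.strong_induction_on with
  | _ m ih =>
    intro acc
    rw [pvLoopB]
    by_cases h : m = 0
    · simp [h]
    · rw [ih (m / 10) (Nat.div_lt_self (by omega) (by norm_num))]
      simp only [h, if_false]
      conv_rhs => rw [pvWS]
      by_cases h0 : m / 10 = 0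
      · simp [h0]
      · simp [h0]; ring

lemma pvAlt_eq_WS (n : Int) : compute_loops_in_digit_glyphs_alt n = pvWS n.natAbs := by
  unfold compute_loops_in_digit_glyphs_alt
  rw [pvLoopB_eq]
  conv_rhs => rw [pvWS]

-- ===== VERDICT (by name: the statement is the Claim_ definition above) =====
theorem compute_loops_in_digit_glyphs_spec : Claim_equal_compute_loops_in_digit_glyphs := by
  intro n _
  unfold Spec_compute_loops_in_digit_glyphs compute_loops_in_digit_glyphs
  rw [pvAlt_eq_WS, pvFoldA_eq]
  have hd : ∀ m : Nat, ((Nat.toDigits 10 m).map pvWc).sum = pvWS m := by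
    intro m
    rw [Nat.toDigits, pvSum_toDigitsCore (m + 1) m [] (by omega)]
    simp
  simp only [PySem.Int.toStr, String.toList_ofList, PySem.Int.toChars]
  by_cases hn : n < 0
  · have : n.toNat = 0 := by omega
    simp [hn, pvWc, hd n.natAbs]
  · have : n.toNat = n.natAbs := by omega
    simp [hn, this, hd n.natAbs]
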